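-- pv_equiv track=rewrite | github.com/JadsonAnderson/Projeto_TAP | src/DesenharLabirintoUsandoTecnicaPython.py | dfs
-- ===== SOURCE A (Python) =====
-- def dfs(matrix, vertice, visited):
--     visited.add(vertice)
--     total_edges = 0
--     for neighbor in range(len(matrix)):
--         ligacao_vizinho = matrix[vertice][neighbor] == 1
--         vizinho_nao_visitado = neighbor not in visited
--
--         if ligacao_vizinho and vizinho_nao_visitado:
--             total_edges += 1 + dfs(matrix, neighbor, visited)
--     return total_edges
-- ===== SOURCE B (Python) =====
-- def dfs(matrix, vertice, visited):
--     # Iterative explicit-stack DFS: count each vertex once, when first discovered.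
--     # Mutates `visited` in place exactly like the original (same final set).
--     visited.add(vertice)
--     stack = [vertice]
--     total_edges = 0
--     n = len(matrix)
--     while stack:
--         node = stack.pop()
--         for j in range(n):
--             if matrix[node][j] == 1 and j not in visited:
--                 visited.add(j)
--                 total_edges += 1
--                 stack.append(j)
--     return total_edges
-- ===== Notes on version B (the rewrite author's own statement) =====
-- stated objective: alternative
-- what changed: Replaces the recursive DFS that sums 1+dfs(neighbor) over the row with an iterative explicit-stack DFS that counts a vertex once at the moment it is first discovered; traversal state is a worklist instead of the call stack.
-- outside the precondition, e.g. on dfs([[0, 0], [0]], 0, set()): A returns 0, B returns 0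
import Mathlib
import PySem

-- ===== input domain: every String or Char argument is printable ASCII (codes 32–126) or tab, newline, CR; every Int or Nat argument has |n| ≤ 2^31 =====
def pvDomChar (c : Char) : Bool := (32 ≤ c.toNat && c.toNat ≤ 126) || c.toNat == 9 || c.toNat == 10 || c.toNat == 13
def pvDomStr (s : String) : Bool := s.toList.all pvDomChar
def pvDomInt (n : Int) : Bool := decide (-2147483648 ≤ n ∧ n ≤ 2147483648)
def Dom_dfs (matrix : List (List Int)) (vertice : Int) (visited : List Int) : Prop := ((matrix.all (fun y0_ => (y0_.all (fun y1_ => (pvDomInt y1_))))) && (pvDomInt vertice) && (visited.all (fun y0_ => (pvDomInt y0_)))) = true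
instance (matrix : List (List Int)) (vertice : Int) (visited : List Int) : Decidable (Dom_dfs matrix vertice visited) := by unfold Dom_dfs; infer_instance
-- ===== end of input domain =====

-- B replaces the recursive neighbour-summing DFS by an iterative explicit-stack DFS that counts
-- each vertex once when first discovered (objective: alternative decomposition, same cost).
-- Both A and B mutate the Python set `visited` in place, leaving it with the same final contents;
-- the equivalence proved here is about the return value.

-- ===== PORT A =====
-- The recursion depth of A is bounded by the number of newly visitable vertices; the fuel
-- `matrix.length + 1` is proved sufficient below (the fuel-0 branch is never reached under it).
-- `dfsForA` is the for-loop of A, `dfsAuxA` one call of A (the mutable set threaded as state).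
mutual
def dfsAuxA (m : List (List Int)) : Nat → Int → List Int → Int × List Int
  | 0, _, s => (0, s)
  | fuel+1, v, s =>
    dfsForA m fuel v (PySem.List.pyRange 0 (m.length : Int) 1) 0 (PySem.Set.add s v)
termination_by fuel v s => (fuel, 0)

def dfsForA (m : List (List Int)) (fuel : Nat) (v : Int) : List Int → Int → List Int → Int × List Int
  | [], c, t => (c, t)
  | j :: l, c, t =>
    if ((PySem.List.pyGet? ((PySem.List.pyGet? m v).getD []) j).getD 0 == 1)
        && !(PySem.Set.contains t j) then
      let r := dfsAuxA m fuel j t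
      dfsForA m fuel v l (c + 1 + r.1) r.2
    else dfsForA m fuel v l c t
termination_by l c t => (fuel, l.length + 1)
end

def dfs (matrix : List (List Int)) (vertice : Int) (visited : List Int) : Int :=
  (dfsAuxA matrix (matrix.length + 1) vertice visited).1

-- ===== PORT B =====
-- `dfsScanB` is the inner for-loop of Source B (state = (visited, total, stack));
-- `dfsLoopB` its while-loop, one fuel unit per pop (`matrix.length + 1` pops suffice).
def dfsScanB (m : List (List Int)) (node : Int) : List Int → List Int → Int → List Int → List Int × Int × List Int
  | [], vis, total, stk => (vis, total, stk)
  | j :: l, vis, total, stk =>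
    if ((PySem.List.pyGet? ((PySem.List.pyGet? m node).getD []) j).getD 0 == 1)
        && !(PySem.Set.contains vis j) then
      dfsScanB m node l (PySem.Set.add vis j) (total + 1) (j :: stk)
    else dfsScanB m node l vis total stk

def dfsLoopB (m : List (List Int)) : Nat → List Int → List Int → Int → Int × List Int
  | _, [], vis, total => (total, vis)
  | 0, _ :: _, vis, total => (total, vis)
  | fuel+1, node :: rest, vis, total =>
    let st := dfsScanB m node (PySem.List.pyRange 0 (m.length : Int) 1) vis total rest
    dfsLoopB m fuel st.2.2 st.1 st.2.1

def dfs_alt (matrix : List (List Int)) (vertice : Int) (visited : List Int) : Int :=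
  (dfsLoopB matrix (matrix.length + 1) [vertice] (PySem.Set.add visited vertice) 0).1

-- ===== PRECONDITION & SPEC =====
-- Pre_ excludes the inputs where A raises IndexError (start index outside Python's index range of
-- a non-empty matrix, or a reached row shorter than len(matrix)); requiring ALL rows to be long
-- enough is slightly narrower than necessary: it also excludes ragged matrices whose short rows
-- are unreachable, on which A still returns (see the cite; A and B agree there too).
def Pre_dfs (matrix : List (List Int)) (vertice : Int) (visited : List Int) : Prop :=
  matrix = [] ∨ ((∀ row ∈ matrix, matrix.length ≤ row.length) ∧
    -(matrix.length : Int) ≤ vertice ∧ vertice < (matrix.length : Int))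
instance (matrix : List (List Int)) (vertice : Int) (visited : List Int) : Decidable (Pre_dfs matrix vertice visited) := by unfold Pre_dfs; infer_instance

def pvWitness_dfs : List (List Int) × Int × List Int := ([[0, 1], [1, 0]], 0, [])

def Spec_dfs (matrix : List (List Int)) (vertice : Int) (visited : List Int) (out : Int) : Prop := out = dfs_alt matrix vertice visited
instance (matrix : List (List Int)) (vertice : Int) (visited : List Int) (out : Int) : Decidable (Spec_dfs matrix vertice visited out) := by unfold Spec_dfs; infer_instance

-- ===== CLAIM (what is proved, stated in full; the proofs are below) =====
def Claim_equal_dfs : Prop := ∀ (matrix : List (List Int)) (vertice : Int) (visited : List Int), Dom_dfs matrix vertice visited → Pre_dfs matrix vertice visited → Spec_dfs matrix vertice visited (dfs matrix vertice visited)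

-- ===== LEMMAS AND PROOFS =====

-- `Edge m u j`: matrix[u][j] == 1, for a column index j produced by range(len(matrix))
-- (row and entry read in the ports' total getD form).
def Edge (m : List (List Int)) (u j : Int) : Prop :=
  j ∈ PySem.List.pyRange 0 (m.length : Int) 1 ∧
  (PySem.List.pyGet? ((PySem.List.pyGet? m u).getD []) j).getD 0 = 1

-- vertices reachable from the worklist `st`, where a vertex may be expanded iff it is on the
-- worklist or not yet in `vis`
inductive ReachG (m : List (List Int)) (st vis : List Int) : Int → Prop
  | base (x : Int) (hx : x ∈ st) : ReachG m st vis x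
  | step (u j : Int) (hu : ReachG m st vis u) (hg : u ∈ st ∨ u ∉ vis)
      (he : Edge m u j) : ReachG m st vis j

-- the fuel measure: number of in-range vertices not yet in s
def newIn (m : List (List Int)) (s : List Int) : Nat :=
  (PySem.List.pyRange 0 (m.length : Int) 1).countP (fun j => decide (j ∉ s))

lemma newIn_le (m : List (List Int)) (s : List Int) : newIn m s ≤ m.length := by
  have h := List.countP_le_length (l := PySem.List.pyRange 0 (m.length : Int) 1)
    (p := fun j => decide (j ∉ s))
  unfold newIn
  rw [PySem.List.length_pyRange_one] at h
  omega

lemma newIn_lt (m : List (List Int)) {s t : List Int} {j : Int}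
    (hj : j ∈ PySem.List.pyRange 0 (m.length : Int) 1) (hjs : j ∉ s)
    (hst : ∀ x ∈ s, x ∈ t) (hjt : j ∈ t) : newIn m t < newIn m s := by
  obtain ⟨l1, l2, hsplit⟩ := List.append_of_mem hj
  unfold newIn
  rw [hsplit, List.countP_append, List.countP_append, List.countP_cons, List.countP_cons]
  have h1 : List.countP (fun j => decide (j ∉ t)) l1 ≤ List.countP (fun j => decide (j ∉ s)) l1 := by
    refine List.countP_mono_left ?_
    intro x _ hx
    simp only [decide_eq_true_eq] at hx ⊢
    exact fun hxs => hx (hst x hxs)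
  have h2 : List.countP (fun j => decide (j ∉ t)) l2 ≤ List.countP (fun j => decide (j ∉ s)) l2 := by
    refine List.countP_mono_left ?_
    intro x _ hx
    simp only [decide_eq_true_eq] at hx ⊢
    exact fun hxs => hx (hst x hxs)
  have hjt' : (decide (j ∉ t) : Bool) = false := by simp [hjt]
  have hjs' : (decide (j ∉ s) : Bool) = true := by simp [hjs]
  rw [hjt', hjs']
  simp only [Bool.false_eq_true, if_false, if_true]
  omega

lemma newIn_append (m : List (List Int)) {s e : List Int} (he : e.Nodup)
    (hin : ∀ x ∈ e, x ∈ PySem.List.pyRange 0 (m.length : Int) 1 ∧ x ∉ s) :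
    newIn m (s ++ e) + e.length ≤ newIn m s := by
  induction e generalizing s with
  | nil => simp
  | cons x e' ih =>
    obtain ⟨hxr, hxs⟩ := hin x (List.mem_cons_self)
    have hlt : newIn m (s ++ [x]) < newIn m s :=
      newIn_lt m hxr hxs (fun y hy => List.mem_append_left _ hy)
        (List.mem_append_right _ (List.mem_singleton.mpr rfl))
    have hih := ih (List.nodup_cons.mp he).2 (s := s ++ [x]) ?_
    · have hsx : s ++ x :: e' = (s ++ [x]) ++ e' := by simp
      rw [hsx]
      simp only [List.length_cons]
      omega
    · intro y hy
      obtain ⟨hyr, hys⟩ := hin y (List.mem_cons_of_mem _ hy)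
      refine ⟨hyr, ?_⟩
      intro hmem
      rcases List.mem_append.mp hmem with h | h
      · exact hys h
      · exact (List.nodup_cons.mp he).1 (List.mem_singleton.mp h ▸ hy)

lemma reachG_mono (m : List (List Int)) {st vis st' vis' : List Int} {w : Int}
    (h : ReachG m st' vis' w)
    (h1 : ∀ x ∈ st', ReachG m st vis x)
    (h2 : ∀ u, ReachG m st vis u → (u ∈ st' ∨ u ∉ vis') → (u ∈ st ∨ u ∉ vis)) :
    ReachG m st vis w := by
  induction h with
  | base x hx => exact h1 x hx
  | step u j hu hg he ih => exact ReachG.step u j ih (h2 u ih hg) he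

lemma reachG_complete (m : List (List Int)) {st vis F : List Int}
    (h1 : ∀ x ∈ st, x ∈ F)
    (h2 : ∀ u ∈ F, (u ∈ st ∨ u ∉ vis) → ∀ j, Edge m u j → j ∈ F) :
    ∀ w, ReachG m st vis w → w ∈ F := by
  intro w h
  induction h with
  | base x hx => exact h1 x hx
  | step u j hu hg he ih => exact h2 u ih hg j he

lemma reachG_nil (m : List (List Int)) {vis : List Int} {w : Int}
    (h : ReachG m [] vis w) : False := by
  induction h with
  | base x hx => simp at hx
  | step u j hu hg he ih => exact ih

-- the full specification of one call of A (visited set threaded as `s` in, `r.2` out)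
def AOK (m : List (List Int)) (v : Int) (s : List Int) (r : Int × List Int) : Prop :=
  ∃ e : List Int,
    r.2 = PySem.Set.add s v ++ e ∧
    e.Nodup ∧
    (∀ x ∈ e, x ∉ PySem.Set.add s v) ∧
    r.1 = (e.length : Int) ∧
    (∀ x, x ∈ r.2 ↔ x ∈ PySem.Set.add s v ∨ ReachG m [v] (PySem.Set.add s v) x) ∧
    (∀ u ∈ r.2, (u ∈ ([v] : List Int) ∨ u ∉ PySem.Set.add s v) →
      ∀ j, Edge m u j → j ∈ r.2)

lemma Afold (m : List (List Int)) (fuel : Nat) (v : Int) (s1 : List Int)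
    (IH : ∀ (v' : Int) (s' : List Int), newIn m (PySem.Set.add s' v') + 1 ≤ fuel →
      AOK m v' s' (dfsAuxA m fuel v' s'))
    (hfuel : newIn m s1 ≤ fuel) :
    ∀ (l : List Int), (∀ j ∈ l, j ∈ PySem.List.pyRange 0 (m.length : Int) 1) →
    ∀ (c0 : Int) (t0 e0 : List Int),
      t0 = s1 ++ e0 → e0.Nodup → (∀ x ∈ e0, x ∉ s1) → c0 = (e0.length : Int) →
      (∀ x ∈ t0, x ∈ s1 ∨ ReachG m [v] s1 x) →
      (∀ u ∈ t0, u ∉ s1 → ∀ j, Edge m u j → j ∈ t0) →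
      ∃ e1 : List Int,
        (dfsForA m fuel v l c0 t0).2 = s1 ++ e1 ∧
        e1.Nodup ∧ (∀ x ∈ e1, x ∉ s1) ∧
        (dfsForA m fuel v l c0 t0).1 = (e1.length : Int) ∧
        (∀ x ∈ t0, x ∈ (dfsForA m fuel v l c0 t0).2) ∧
        (∀ x ∈ (dfsForA m fuel v l c0 t0).2, x ∈ s1 ∨ ReachG m [v] s1 x) ∧
        (∀ u ∈ (dfsForA m fuel v l c0 t0).2, u ∉ s1 →
          ∀ j, Edge m u j → j ∈ (dfsForA m fuel v l c0 t0).2) ∧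
        (∀ j ∈ l, Edge m v j → j ∈ (dfsForA m fuel v l c0 t0).2) := by
  intro l
  induction l with
  | nil =>
    intro _ c0 t0 e0 ht he0nd he0ns hc0 hsound hclosed
    refine ⟨e0, by simpa [dfsForA] using ht, he0nd, he0ns, by simpa [dfsForA] using hc0,
      ?_, by simpa [dfsForA] using hsound, by simpa [dfsForA] using hclosed, by simp⟩
    intro x hx
    simpa [dfsForA] using hx
  | cons j l ihl =>
    intro hl c0 t0 e0 ht he0nd he0ns hc0 hsound hclosed
    have hjr : j ∈ PySem.List.pyRange 0 (m.length : Int) 1 := hl j List.mem_cons_self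
    have hl' : ∀ x ∈ l, x ∈ PySem.List.pyRange 0 (m.length : Int) 1 :=
      fun x hx => hl x (List.mem_cons_of_mem _ hx)
    by_cases h1 : (PySem.List.pyGet? ((PySem.List.pyGet? m v).getD []) j).getD 0 = 1
    · by_cases h2 : j ∈ t0
      · -- neighbour already visited: loop skips it
        have hct : PySem.Set.contains t0 j = true := (PySem.Set.contains_iff t0 j).mpr h2
        have hcond : (((PySem.List.pyGet? ((PySem.List.pyGet? m v).getD []) j).getD 0 == 1)
            && !(PySem.Set.contains t0 j)) = false := by
          rw [hct]; simp
        have hstep : dfsForA m fuel v (j :: l) c0 t0 = dfsForA m fuel v l c0 t0 := by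
          simp only [dfsForA]
          rw [hcond]
          simp
        rw [hstep]
        obtain ⟨e1, ha, hb, hc, hd, mono, snd, cl, P⟩ :=
          ihl hl' c0 t0 e0 ht he0nd he0ns hc0 hsound hclosed
        refine ⟨e1, ha, hb, hc, hd, mono, snd, cl, ?_⟩
        intro j' hj' hE
        rcases List.mem_cons.mp hj' with rfl | h
        · exact mono j' h2
        · exact P j' h hE
      · -- new neighbour: recursive call of A
        have hcf : PySem.Set.contains t0 j = false := by
          rw [Bool.eq_false_iff]
          exact fun hh => h2 ((PySem.Set.contains_iff t0 j).mp hh)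
        have hcond : (((PySem.List.pyGet? ((PySem.List.pyGet? m v).getD []) j).getD 0 == 1)
            && !(PySem.Set.contains t0 j)) = true := by
          rw [hcf, h1]; simp
        have hstep : dfsForA m fuel v (j :: l) c0 t0
            = dfsForA m fuel v l (c0 + 1 + (dfsAuxA m fuel j t0).1) (dfsAuxA m fuel j t0).2 := by
          simp only [dfsForA]
          rw [hcond]
          simp
        have hjs1 : j ∉ s1 := fun hj => h2 (ht ▸ List.mem_append_left _ hj)
        have hs1t0 : ∀ x ∈ s1, x ∈ t0 := fun x hx => ht ▸ List.mem_append_left _ hx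
        have hsuf : newIn m (PySem.Set.add t0 j) + 1 ≤ fuel := by
          have hlt : newIn m (PySem.Set.add t0 j) < newIn m s1 :=
            newIn_lt m hjr hjs1
              (fun x hx => (PySem.Set.mem_add _ _ _).mpr (Or.inl (hs1t0 x hx)))
              ((PySem.Set.mem_add _ _ _).mpr (Or.inr rfl))
          omega
        obtain ⟨er, hr2, hrnd, hrns, hr1, hrmem, hrcl⟩ := IH j t0 hsuf
        have haddj : PySem.Set.add t0 j = t0 ++ [j] := PySem.Set.add_of_not_mem h2
        have hr2' : (dfsAuxA m fuel j t0).2 = s1 ++ (e0 ++ j :: er) := by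
          rw [hr2, haddj, ht]; simp
        have hmonor : ∀ x ∈ t0, x ∈ (dfsAuxA m fuel j t0).2 := by
          intro x hx
          rw [hr2, haddj]
          exact List.mem_append_left _ (List.mem_append_left _ hx)
        have hjr2 : j ∈ (dfsAuxA m fuel j t0).2 := by
          rw [hr2]
          exact List.mem_append_left _ ((PySem.Set.mem_add _ _ _).mpr (Or.inr rfl))
        have hRj : ReachG m [v] s1 j :=
          ReachG.step v j (ReachG.base v (List.mem_singleton.mpr rfl))
            (Or.inl (List.mem_singleton.mpr rfl)) ⟨hjr, h1⟩
        have hsound' : ∀ x ∈ (dfsAuxA m fuel j t0).2, x ∈ s1 ∨ ReachG m [v] s1 x := by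
          intro x hx
          rcases (hrmem x).1 hx with h | h
          · rw [haddj] at h
            rcases List.mem_append.mp h with h' | h'
            · exact hsound x h'
            · exact Or.inr (List.mem_singleton.mp h' ▸ hRj)
          · refine Or.inr (reachG_mono m h ?_ ?_)
            · intro y hy
              rw [List.mem_singleton.mp hy]
              exact hRj
            · intro u hu hg
              rcases hg with hg | hg
              · rw [List.mem_singleton.mp hg]
                exact Or.inr hjs1
              · exact Or.inr
                  (fun hus => hg ((PySem.Set.mem_add _ _ _).mpr (Or.inl (hs1t0 u hus))))
        have hclosed' : ∀ u ∈ (dfsAuxA m fuel j t0).2, u ∉ s1 →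
            ∀ j', Edge m u j' → j' ∈ (dfsAuxA m fuel j t0).2 := by
          intro u hu hus j' hE
          by_cases hut : u ∈ t0
          · exact hmonor j' (hclosed u hut hus j' hE)
          · refine hrcl u hu ?_ j' hE
            by_cases huj : u = j
            · exact Or.inl (List.mem_singleton.mpr huj)
            · refine Or.inr ?_
              rw [haddj]
              intro hmem
              rcases List.mem_append.mp hmem with h' | h'
              · exact hut h'
              · exact huj (List.mem_singleton.mp h')
        have hnd' : (e0 ++ j :: er).Nodup := by
          rw [List.nodup_append]
          refine ⟨he0nd, ?_, ?_⟩
          · rw [List.nodup_cons]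
            exact ⟨fun hjer => (hrns j hjer) ((PySem.Set.mem_add _ _ _).mpr (Or.inr rfl)), hrnd⟩
          · intro a ha b hb hab
            subst hab
            rcases List.mem_cons.mp hb with h | h'
            · exact h2 (h ▸ ht ▸ List.mem_append_right _ ha)
            · exact hrns a h'
                ((PySem.Set.mem_add _ _ _).mpr (Or.inl (ht ▸ List.mem_append_right _ ha)))
        have hns' : ∀ x ∈ e0 ++ j :: er, x ∉ s1 := by
          intro x hx
          rcases List.mem_append.mp hx with h | h
          · exact he0ns x h
          · rcases List.mem_cons.mp h with rfl | h'
            · exact hjs1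
            · exact fun hxs => hrns x h'
                ((PySem.Set.mem_add _ _ _).mpr (Or.inl (hs1t0 x hxs)))
        have hc' : c0 + 1 + (dfsAuxA m fuel j t0).1 = (((e0 ++ j :: er).length : Nat) : Int) := by
          rw [hc0, hr1]
          push_cast [List.length_append, List.length_cons]
          ring
        obtain ⟨e1, ha, hb, hc, hd, mono, snd, cl, P⟩ :=
          ihl hl' (c0 + 1 + (dfsAuxA m fuel j t0).1) (dfsAuxA m fuel j t0).2 (e0 ++ j :: er)
            hr2' hnd' hns' hc' hsound' hclosed'
        rw [hstep]
        refine ⟨e1, ha, hb, hc, hd, ?_, snd, cl, ?_⟩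
        · intro x hx
          exact mono x (hmonor x hx)
        · intro j' hj' hE
          rcases List.mem_cons.mp hj' with rfl | h
          · exact mono j' hjr2
          · exact P j' h hE
    · -- no edge: loop skips, and Edge m v j is impossible
      have hbf : ((PySem.List.pyGet? ((PySem.List.pyGet? m v).getD []) j).getD 0 == 1) = false := by
        rw [Bool.eq_false_iff]
        intro hh
        exact h1 (by simpa using hh)
      have hstep : dfsForA m fuel v (j :: l) c0 t0 = dfsForA m fuel v l c0 t0 := by
        simp only [dfsForA]
        rw [show (((PySem.List.pyGet? ((PySem.List.pyGet? m v).getD []) j).getD 0 == 1)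
          && !(PySem.Set.contains t0 j)) = false from by rw [hbf]; simp]
        simp
      rw [hstep]
      obtain ⟨e1, ha, hb, hc, hd, mono, snd, cl, P⟩ :=
        ihl hl' c0 t0 e0 ht he0nd he0ns hc0 hsound hclosed
      refine ⟨e1, ha, hb, hc, hd, mono, snd, cl, ?_⟩
      intro j' hj' hE
      rcases List.mem_cons.mp hj' with rfl | h
      · exact absurd hE.2 h1
      · exact P j' h hE

lemma dfsAuxA_ok (m : List (List Int)) :
    ∀ (fuel : Nat) (v : Int) (s : List Int),
    newIn m (PySem.Set.add s v) + 1 ≤ fuel → AOK m v s (dfsAuxA m fuel v s) := by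
  intro fuel
  induction fuel with
  | zero =>
    intro v s h
    exact absurd h (by omega)
  | succ fuel ih =>
    intro v s hf
    have hfs : newIn m (PySem.Set.add s v) ≤ fuel := by omega
    have heq : dfsAuxA m (fuel + 1) v s
        = dfsForA m fuel v (PySem.List.pyRange 0 (m.length : Int) 1) 0 (PySem.Set.add s v) := by
      simp [dfsAuxA]
    unfold AOK
    rw [heq]
    obtain ⟨e1, ha, hb, hc, hd, mono, snd, cl, P⟩ :=
      Afold m fuel v (PySem.Set.add s v) ih hfs
        (PySem.List.pyRange 0 (m.length : Int) 1) (fun j hj => hj)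
        0 (PySem.Set.add s v) [] (by simp) List.nodup_nil (by simp) (by simp)
        (fun x hx => Or.inl hx) (fun u hu hus => absurd hu hus)
    have hcl : ∀ u ∈ (dfsForA m fuel v (PySem.List.pyRange 0 (m.length : Int) 1) 0
          (PySem.Set.add s v)).2,
        (u ∈ ([v] : List Int) ∨ u ∉ PySem.Set.add s v) → ∀ j, Edge m u j →
        j ∈ (dfsForA m fuel v (PySem.List.pyRange 0 (m.length : Int) 1) 0
          (PySem.Set.add s v)).2 := by
      intro u hu hg j hE
      rcases hg with hg | hg
      · rw [List.mem_singleton.mp hg] at hE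
        exact P j hE.1 hE
      · exact cl u hu hg j hE
    refine ⟨e1, ha, hb, hc, hd, ?_, hcl⟩
    intro x
    constructor
    · intro hx
      exact snd x hx
    · intro hx
      rcases hx with h | h
      · exact mono x h
      · refine reachG_complete m ?_ hcl x h
        intro y hy
        rw [List.mem_singleton.mp hy]
        exact mono v ((PySem.Set.mem_add _ _ _).mpr (Or.inr rfl))

lemma Bscan (m : List (List Int)) (node : Int) :
    ∀ (l : List Int), (∀ j ∈ l, j ∈ PySem.List.pyRange 0 (m.length : Int) 1) →
    ∀ (vis : List Int) (total : Int) (stk : List Int),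
    ∃ e : List Int,
      dfsScanB m node l vis total stk = (vis ++ e, total + (e.length : Int), e.reverse ++ stk) ∧
      e.Nodup ∧ (∀ x ∈ e, x ∉ vis ∧ Edge m node x) ∧
      (∀ j ∈ l, Edge m node j → j ∈ vis ++ e) := by
  intro l
  induction l with
  | nil =>
    intro _ vis total stk
    exact ⟨[], by simp [dfsScanB], List.nodup_nil, by simp, by simp⟩
  | cons j l ihl =>
    intro hl vis total stk
    have hjr : j ∈ PySem.List.pyRange 0 (m.length : Int) 1 := hl j List.mem_cons_self
    have hl' : ∀ x ∈ l, x ∈ PySem.List.pyRange 0 (m.length : Int) 1 :=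
      fun x hx => hl x (List.mem_cons_of_mem _ hx)
    by_cases h1 : (PySem.List.pyGet? ((PySem.List.pyGet? m node).getD []) j).getD 0 = 1
    · by_cases h2 : j ∈ vis
      · have hct : PySem.Set.contains vis j = true := (PySem.Set.contains_iff vis j).mpr h2
        have hstep : dfsScanB m node (j :: l) vis total stk = dfsScanB m node l vis total stk := by
          simp only [dfsScanB]
          rw [show (((PySem.List.pyGet? ((PySem.List.pyGet? m node).getD []) j).getD 0 == 1)
            && !(PySem.Set.contains vis j)) = false from by rw [hct]; simp]
          simp
        rw [hstep]
        obtain ⟨e, heq, hnd, hprops, P⟩ := ihl hl' vis total stk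
        refine ⟨e, heq, hnd, hprops, ?_⟩
        intro j' hj' hE
        rcases List.mem_cons.mp hj' with rfl | h
        · exact List.mem_append_left _ h2
        · exact P j' h hE
      · have hcf : PySem.Set.contains vis j = false := by
          rw [Bool.eq_false_iff]
          exact fun hh => h2 ((PySem.Set.contains_iff vis j).mp hh)
        have hstep : dfsScanB m node (j :: l) vis total stk
            = dfsScanB m node l (PySem.Set.add vis j) (total + 1) (j :: stk) := by
          simp only [dfsScanB]
          rw [show (((PySem.List.pyGet? ((PySem.List.pyGet? m node).getD []) j).getD 0 == 1)
            && !(PySem.Set.contains vis j)) = true from by rw [hcf, h1]; simp]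
          simp
        have haddj : PySem.Set.add vis j = vis ++ [j] := PySem.Set.add_of_not_mem h2
        obtain ⟨e, heq, hnd, hprops, P⟩ := ihl hl' (PySem.Set.add vis j) (total + 1) (j :: stk)
        rw [hstep, heq, haddj]
        refine ⟨j :: e, ?_, ?_, ?_, ?_⟩
        · simp only [Prod.mk.injEq]
          refine ⟨by simp, ?_, by simp⟩
          push_cast [List.length_cons]
          ring
        · rw [List.nodup_cons]
          refine ⟨?_, hnd⟩
          intro hje
          exact (hprops j hje).1 ((PySem.Set.mem_add _ _ _).mpr (Or.inr rfl))
        · intro x hx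
          rcases List.mem_cons.mp hx with rfl | h
          · exact ⟨h2, ⟨hjr, h1⟩⟩
          · obtain ⟨hxv, hxE⟩ := hprops x h
            exact ⟨fun hv => hxv ((PySem.Set.mem_add _ _ _).mpr (Or.inl hv)), hxE⟩
        · intro j' hj' hE
          rcases List.mem_cons.mp hj' with rfl | h
          · exact List.mem_append_right _ List.mem_cons_self
          · have hmem := P j' h hE
            rw [haddj] at hmem
            simp only [List.mem_append, List.mem_cons] at hmem ⊢
            tauto
    · have hbf : ((PySem.List.pyGet? ((PySem.List.pyGet? m node).getD []) j).getD 0 == 1) = false := by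
        rw [Bool.eq_false_iff]
        intro hh
        exact h1 (by simpa using hh)
      have hstep : dfsScanB m node (j :: l) vis total stk = dfsScanB m node l vis total stk := by
        simp only [dfsScanB]
        rw [show (((PySem.List.pyGet? ((PySem.List.pyGet? m node).getD []) j).getD 0 == 1)
          && !(PySem.Set.contains vis j)) = false from by rw [hbf]; simp]
        simp
      rw [hstep]
      obtain ⟨e, heq, hnd, hprops, P⟩ := ihl hl' vis total stk
      refine ⟨e, heq, hnd, hprops, ?_⟩
      intro j' hj' hE
      rcases List.mem_cons.mp hj' with rfl | h
      · exact absurd hE.2 h1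
      · exact P j' h hE

lemma dfsLoopB_nil (m : List (List Int)) (fuel : Nat) (vis : List Int) (total : Int) :
    dfsLoopB m fuel [] vis total = (total, vis) := by
  cases fuel <;> rfl

lemma dfsLoopB_ok (m : List (List Int)) :
    ∀ (fuel : Nat) (stack vis : List Int) (total : Int),
    stack.length + newIn m vis ≤ fuel → (∀ x ∈ stack, x ∈ vis) →
    ∃ e : List Int,
      dfsLoopB m fuel stack vis total = (total + (e.length : Int), vis ++ e) ∧
      e.Nodup ∧ (∀ x ∈ e, x ∉ vis) ∧
      (∀ u ∈ vis ++ e, (u ∈ stack ∨ u ∉ vis) → ∀ j, Edge m u j → j ∈ vis ++ e) ∧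
      (∀ x, x ∈ vis ++ e ↔ x ∈ vis ∨ ReachG m stack vis x) := by
  have hnilpkg : ∀ (fuel : Nat) (vis : List Int) (total : Int),
      ∃ e : List Int,
        dfsLoopB m fuel [] vis total = (total + (e.length : Int), vis ++ e) ∧
        e.Nodup ∧ (∀ x ∈ e, x ∉ vis) ∧
        (∀ u ∈ vis ++ e, (u ∈ ([] : List Int) ∨ u ∉ vis) → ∀ j, Edge m u j → j ∈ vis ++ e) ∧
        (∀ x, x ∈ vis ++ e ↔ x ∈ vis ∨ ReachG m ([] : List Int) vis x) := by
    intro fuel vis total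
    refine ⟨[], by rw [dfsLoopB_nil]; simp, List.nodup_nil, by simp, ?_, ?_⟩
    · intro u hu hg j hE
      rcases hg with hg | hg
      · simp at hg
      · exact absurd (by simpa using hu) hg
    · intro x
      simp only [List.append_nil]
      constructor
      · exact fun h => Or.inl h
      · intro h
        rcases h with h | h
        · exact h
        · exact (reachG_nil m h).elim
  intro fuel
  induction fuel with
  | zero =>
    intro stack vis total hsuf hsv
    cases stack with
    | nil => exact hnilpkg 0 vis total
    | cons node rest =>
      simp only [List.length_cons] at hsuf
      omega
  | succ fuel ih =>
    intro stack vis total hsuf hsv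
    cases stack with
    | nil => exact hnilpkg (fuel + 1) vis total
    | cons node rest =>
      obtain ⟨e0, heq0, hnd0, hprops0, P0⟩ :=
        Bscan m node (PySem.List.pyRange 0 (m.length : Int) 1) (fun j hj => hj) vis total rest
      have hloopstep : dfsLoopB m (fuel + 1) (node :: rest) vis total
          = dfsLoopB m fuel (e0.reverse ++ rest) (vis ++ e0) (total + (e0.length : Int)) := by
        simp only [dfsLoopB, heq0]
      have hsuf' : (e0.reverse ++ rest).length + newIn m (vis ++ e0) ≤ fuel := by
        have hap := newIn_append m hnd0 (fun x hx => ⟨(hprops0 x hx).2.1, (hprops0 x hx).1⟩)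
        simp only [List.length_cons] at hsuf
        simp only [List.length_append, List.length_reverse]
        omega
      have hsv' : ∀ x ∈ e0.reverse ++ rest, x ∈ vis ++ e0 := by
        intro x hx
        rcases List.mem_append.mp hx with h | h
        · exact List.mem_append_right _ (List.mem_reverse.mp h)
        · exact List.mem_append_left _ (hsv x (List.mem_cons_of_mem _ h))
      obtain ⟨e1, heq1, hnd1, hns1, hcl1, hmem1⟩ :=
        ih (e0.reverse ++ rest) (vis ++ e0) (total + (e0.length : Int)) hsuf' hsv'
      have hFassoc : vis ++ (e0 ++ e1) = (vis ++ e0) ++ e1 := (List.append_assoc _ _ _).symm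
      have hCL : ∀ u ∈ vis ++ (e0 ++ e1), (u ∈ node :: rest ∨ u ∉ vis) →
          ∀ j, Edge m u j → j ∈ vis ++ (e0 ++ e1) := by
        intro u hu hg j hE
        rw [hFassoc] at hu ⊢
        rcases hg with hg | hg
        · rcases List.mem_cons.mp hg with rfl | hgr
          · exact List.mem_append_left _ (P0 j hE.1 hE)
          · exact hcl1 u hu (Or.inl (List.mem_append_right _ hgr)) j hE
        · by_cases hue : u ∈ e0
          · exact hcl1 u hu (Or.inl (List.mem_append_left _ (List.mem_reverse.mpr hue))) j hE
          · refine hcl1 u hu (Or.inr ?_) j hE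
            intro hmem
            rcases List.mem_append.mp hmem with h | h
            · exact hg h
            · exact hue h
      have hMI : ∀ x, x ∈ vis ++ (e0 ++ e1) ↔ x ∈ vis ∨ ReachG m (node :: rest) vis x := by
        intro x
        constructor
        · intro hx
          rw [hFassoc] at hx
          rcases (hmem1 x).1 hx with h | h
          · rcases List.mem_append.mp h with h' | h'
            · exact Or.inl h'
            · exact Or.inr (ReachG.step node x (ReachG.base node List.mem_cons_self)
                (Or.inl List.mem_cons_self) (hprops0 x h').2)
          · refine Or.inr (reachG_mono m h ?_ ?_)
            · intro y hy
              rcases List.mem_append.mp hy with h' | h'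
              · exact ReachG.step node y (ReachG.base node List.mem_cons_self)
                  (Or.inl List.mem_cons_self) (hprops0 y (List.mem_reverse.mp h')).2
              · exact ReachG.base y (List.mem_cons_of_mem _ h')
            · intro u _ hg
              rcases hg with hg | hg
              · rcases List.mem_append.mp hg with h' | h'
                · exact Or.inr (hprops0 u (List.mem_reverse.mp h')).1
                · exact Or.inl (List.mem_cons_of_mem _ h')
              · exact Or.inr (fun huv => hg (List.mem_append_left _ huv))
        · intro hx
          rcases hx with h | h
          · exact List.mem_append_left _ h
          · refine reachG_complete m ?_ hCL x h
            intro y hy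
            exact List.mem_append_left _ (hsv y hy)
      refine ⟨e0 ++ e1, ?_, ?_, ?_, hCL, hMI⟩
      · rw [hloopstep, heq1]
        simp only [Prod.mk.injEq]
        constructor
        · push_cast [List.length_append]
          ring
        · rw [hFassoc]
      · rw [List.nodup_append]
        exact ⟨hnd0, hnd1, fun a ha b hb hab =>
          hns1 b hb (hab ▸ List.mem_append_right _ ha)⟩
      · intro x hx
        rcases List.mem_append.mp hx with h | h
        · exact (hprops0 x h).1
        · exact fun hxv => hns1 x h (List.mem_append_left _ hxv)

-- ===== VERDICT (by name: the statement is the Claim_ definition above) =====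
theorem dfs_spec : Claim_equal_dfs := by
  unfold Claim_equal_dfs
  intro matrix vertice visited _ _
  unfold Spec_dfs dfs dfs_alt
  have hlen : newIn matrix (PySem.Set.add visited vertice) ≤ matrix.length :=
    newIn_le matrix _
  obtain ⟨eA, hA2, hAnd, hAns, hA1, hAmem, -⟩ :=
    dfsAuxA_ok matrix (matrix.length + 1) vertice visited (by omega)
  obtain ⟨eB, hBeq, hBnd, hBns, -, hBmem⟩ :=
    dfsLoopB_ok matrix (matrix.length + 1) [vertice] (PySem.Set.add visited vertice) 0
      (by simp only [List.length_cons, List.length_nil]; omega)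
      (by intro x hx
          rw [List.mem_singleton.mp hx]
          exact (PySem.Set.mem_add _ _ _).mpr (Or.inr rfl))
  rw [hBeq]
  have hperm : eA.Perm eB := by
    rw [List.perm_ext_iff_of_nodup hAnd hBnd]
    intro x
    constructor
    · intro hx
      have hxF : x ∈ (dfsAuxA matrix (matrix.length + 1) vertice visited).2 := by
        rw [hA2]; exact List.mem_append_right _ hx
      have hxs := hAns x hx
      rcases (hAmem x).1 hxF with h | h
      · exact absurd h hxs
      · have hmem : x ∈ PySem.Set.add visited vertice ++ eB := (hBmem x).2 (Or.inr h)
        rcases List.mem_append.mp hmem with h' | h'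
        · exact absurd h' hxs
        · exact h'
    · intro hx
      have hxs : x ∉ PySem.Set.add visited vertice := hBns x hx
      have hxF : x ∈ PySem.Set.add visited vertice ++ eB := List.mem_append_right _ hx
      rcases (hBmem x).1 hxF with h | h
      · exact absurd h hxs
      · have hmem : x ∈ (dfsAuxA matrix (matrix.length + 1) vertice visited).2 :=
          (hAmem x).2 (Or.inr h)
        rw [hA2] at hmem
        rcases List.mem_append.mp hmem with h' | h'
        · exact absurd h' hxs
        · exact h'
  rw [hA1, hperm.length_eq]
  omega
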